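-- pv_equiv track=rewrite | github.com/cwhiii/CWOC | src/backend/test_habits.py | get_habit_streak
-- ===== SOURCE A (Python) =====
-- def get_habit_streak(exceptions):
--     """
--     Validates: Requirements 9.1, 9.2, 9.3
--
--     Calculate streak from recurrence exception entries.
--     Walk backward from the most recent entry. Broken-off entries are skipped
--     (neutral). Stop at the first genuinely missed period.
--     - exceptions: list of dicts sorted chronologically (oldest first)
--     - Returns integer streak count
--     """
--     if not exceptions:
--         return 0
--
--     streak = 0
--     # Walk backward from most recent
--     for entry in reversed(exceptions):
--         if entry.get('broken_off', False):
--             continue  # neutral — skip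
--         if entry.get('habit_success', 0) >= entry.get('habit_goal', 1):
--             streak += 1
--         else:
--             break  # genuinely missed — stop
--     return streak
-- ===== SOURCE B (Python) =====
-- def get_habit_streak(exceptions):
--     # Forward chronological pass: broken-off entries are neutral; a met goal
--     # extends the running streak, a genuine miss resets it to zero.  The
--     # value left after scanning the whole list is the trailing streak.
--     streak = 0
--     for e in exceptions:
--         if e.get('broken_off', False):
--             continue
--         if e.get('habit_success', 0) >= e.get('habit_goal', 1):
--             streak += 1
--         else:
--             streak = 0
--     return streak
-- ===== Notes on version B (the rewrite author's own statement) =====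
-- stated objective: alternative
-- what changed: Replaces A's backward walk with break (reversed list, stop at first miss) by a forward chronological pass with a reset-to-zero accumulator: a miss resets the streak instead of stopping the scan, so no reversal and no early exit are needed.
import Mathlib
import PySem

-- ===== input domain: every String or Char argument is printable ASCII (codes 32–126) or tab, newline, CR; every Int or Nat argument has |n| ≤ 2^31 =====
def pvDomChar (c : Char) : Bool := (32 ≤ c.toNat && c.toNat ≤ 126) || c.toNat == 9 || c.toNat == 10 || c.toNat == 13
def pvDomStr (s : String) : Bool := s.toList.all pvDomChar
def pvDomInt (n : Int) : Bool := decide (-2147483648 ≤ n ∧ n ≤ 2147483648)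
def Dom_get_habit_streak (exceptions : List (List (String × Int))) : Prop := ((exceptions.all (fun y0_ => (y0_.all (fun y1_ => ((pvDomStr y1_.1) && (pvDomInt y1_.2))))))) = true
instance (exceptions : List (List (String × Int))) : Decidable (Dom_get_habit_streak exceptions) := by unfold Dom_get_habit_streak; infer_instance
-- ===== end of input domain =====

-- B replaces A's backward walk with break by a forward pass whose accumulator resets to 0 at a miss; same return value, proved below.

-- ===== PORT A =====
-- entry.get(k, dflt): first-match association-list lookup (Python dict)
def pvGetA (e : List (String × Int)) (k : String) (dflt : Int) : Int :=
  (PySem.Dict.mk e).getD k dflt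

-- the 'for entry in reversed(exceptions)' loop with its streak accumulator and break
def pvLoopA : List (List (String × Int)) → Int → Int
  | [], streak => streak
  | e :: rest, streak =>
    if pvGetA e "broken_off" 0 ≠ 0 then
      pvLoopA rest streak                    -- continue (neutral, skip)
    else if pvGetA e "habit_success" 0 ≥ pvGetA e "habit_goal" 1 then
      pvLoopA rest (streak + 1)
    else
      streak                                  -- break

def get_habit_streak (exceptions : List (List (String × Int))) : Int :=
  if exceptions = [] then 0
  else pvLoopA exceptions.reverse 0

-- ===== PORT B =====
-- one step of B's forward loop: skip broken-off, +1 on success, reset to 0 on a miss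
def pvStepB (streak : Int) (e : List (String × Int)) : Int :=
  if (PySem.Dict.mk e).getD "broken_off" 0 ≠ 0 then streak
  else if (PySem.Dict.mk e).getD "habit_success" 0 ≥ (PySem.Dict.mk e).getD "habit_goal" 1 then streak + 1
  else 0

def get_habit_streak_alt (exceptions : List (List (String × Int))) : Int :=
  exceptions.foldl pvStepB 0

-- ===== PRECONDITION & SPEC =====
def Spec_get_habit_streak (exceptions : List (List (String × Int))) (out : Int) : Prop := out = get_habit_streak_alt exceptions
instance (exceptions : List (List (String × Int))) (out : Int) : Decidable (Spec_get_habit_streak exceptions out) := by unfold Spec_get_habit_streak; infer_instance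

-- ===== CLAIM =====
def Claim_equal_get_habit_streak : Prop := ∀ (exceptions : List (List (String × Int))), Dom_get_habit_streak exceptions → Spec_get_habit_streak exceptions (get_habit_streak exceptions)

-- ===== LEMMAS AND PROOFS =====

-- proof-only predicates: an entry counts (not broken off) / is a genuine miss
def pvAliveB (e : List (String × Int)) : Bool :=
  (PySem.Dict.mk e).getD "broken_off" 0 == 0

def pvMissedB (e : List (String × Int)) : Bool :=
  (PySem.Dict.mk e).getD "habit_success" 0 < (PySem.Dict.mk e).getD "habit_goal" 1

-- A's backward loop returns s plus the index of the first miss among the alive entries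
lemma pvLoopA_eq (l : List (List (String × Int))) (s : Int) :
    pvLoopA l s = s + (((l.filter pvAliveB).findIdx pvMissedB : Nat) : Int) := by
  induction l generalizing s with
  | nil => simp [pvLoopA]
  | cons e rest ih =>
    by_cases hb : pvGetA e "broken_off" 0 ≠ 0
    · have hb' : pvAliveB e = false := by
        simp [pvAliveB, pvGetA] at *; omega
      simp [pvLoopA, hb, hb', ih]
    · have hb' : pvAliveB e = true := by
        simp [pvAliveB, pvGetA] at *; omega
      by_cases hs : pvGetA e "habit_success" 0 ≥ pvGetA e "habit_goal" 1
      · have hm : pvMissedB e = false := by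
          simp [pvMissedB, pvGetA] at *; omega
        simp [pvLoopA, hb, hs, hb', List.findIdx_cons, hm, ih]
        omega
      · have hm : pvMissedB e = true := by
          simp [pvMissedB, pvGetA] at *; omega
        simp [pvLoopA, hb, hs, hb', List.findIdx_cons, hm]

-- B's forward reset fold computes the same quantity on the reversed list
lemma pvFoldB_eq (l : List (List (String × Int))) :
    l.foldl pvStepB 0 = (((l.reverse.filter pvAliveB).findIdx pvMissedB : Nat) : Int) := by
  induction l using List.reverseRecOn with
  | nil => simp
  | append_singleton l e ih =>
    by_cases hb : (PySem.Dict.mk e).getD "broken_off" 0 ≠ 0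
    · have hb' : pvAliveB e = false := by
        simp [pvAliveB] at *; omega
      simp [List.foldl_append, pvStepB, hb, hb', ih]
    · have hb' : pvAliveB e = true := by
        simp [pvAliveB] at *; omega
      by_cases hs : (PySem.Dict.mk e).getD "habit_success" 0 ≥ (PySem.Dict.mk e).getD "habit_goal" 1
      · have hm : pvMissedB e = false := by
          simp [pvMissedB] at *; omega
        simp [List.foldl_append, pvStepB, hb, hs, hb', List.findIdx_cons, hm, ih]
      · have hm : pvMissedB e = true := by
          simp [pvMissedB]; omega
        simp [List.foldl_append, pvStepB, hb, hs, hb', List.findIdx_cons, hm]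

-- ===== VERDICT =====
theorem get_habit_streak_spec : Claim_equal_get_habit_streak := by
  intro xs _
  unfold Spec_get_habit_streak get_habit_streak get_habit_streak_alt
  by_cases h : xs = []
  · subst h; simp
  · simp [h, pvLoopA_eq, pvFoldB_eq]
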